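-- pv_equiv track=rewrite | github.com/mathiaswold/lolbuilds | main.py | format_skill_order
-- ===== SOURCE A (Python) =====
-- def format_skill_order(skill_order):
--     """
--     Formats recommended skill order into shorthand notation.
--
--     Example: Q.E.W.Q, Q>E>W means lv1: Q, lv2: E, lv3: W, lv4: Q, then max Q first, then E, then W.
--     """
--     skills = {
--         "q": 0,
--         "w": 0,
--         "e": 0,
--     }
--
--     output = []
--
--     for skill in skill_order:
--         if skill in skills:
--             skills[skill] += 1
--         for skill, count in skills.items():
--             if count == 5:
--                 output.append(skill.upper())
--                 skills[skill] = 0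
--
--     first_skills = ".".join(skill_order[:4]).upper()
--
--     try:
--         return (f"{first_skills}, {output[0]}>{output[1]}>{output[2]}")
--     except:
--         return "Not enough data for this skill order"
-- ===== SOURCE B (Python) =====
-- def format_skill_order(skill_order):
--     """
--     Formats recommended skill order into shorthand notation.
--
--     Single cumulative pass: count q/w/e occurrences (never reset) and append
--     the skill's uppercase letter whenever its running count hits a multiple of 5.
--     """
--     counts = {
--         "q": 0,
--         "w": 0,
--         "e": 0,
--     }
--
--     output = []
--
--     for skill in skill_order:
--         if skill in counts:
--             counts[skill] += 1
--             if counts[skill] % 5 == 0: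
--                 output.append(skill.upper())
--
--     first_skills = ".".join(skill_order[:4]).upper()
--
--     if len(output) >= 3:
--         return f"{first_skills}, {output[0]}>{output[1]}>{output[2]}"
--     return "Not enough data for this skill order"
-- ===== Notes on version B (the rewrite author's own statement) =====
-- stated objective: faster
-- what changed: Replaces A's reset-to-zero dict plus an inner scan over all three counters after every element with a single cumulative counter per skill checked by 'count % 5 == 0' only for the skill just seen, and replaces the try/except over output[0..2] with an explicit length test.
import Mathlib
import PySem

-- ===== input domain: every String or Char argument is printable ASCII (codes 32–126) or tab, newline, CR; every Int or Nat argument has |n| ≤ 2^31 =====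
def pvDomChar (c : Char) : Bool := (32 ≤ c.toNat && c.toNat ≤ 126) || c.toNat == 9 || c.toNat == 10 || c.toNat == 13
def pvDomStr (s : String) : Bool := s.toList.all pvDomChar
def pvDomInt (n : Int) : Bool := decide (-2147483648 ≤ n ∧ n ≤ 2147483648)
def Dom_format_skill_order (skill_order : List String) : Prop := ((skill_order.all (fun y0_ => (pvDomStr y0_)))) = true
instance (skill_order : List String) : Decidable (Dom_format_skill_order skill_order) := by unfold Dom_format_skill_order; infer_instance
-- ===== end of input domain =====

-- B keeps one cumulative counter per skill and checks only the skill just seen ('count % 5 == 0'),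
-- replacing A's reset-to-zero dict with its inner scan over all three counters after every element,
-- and replaces A's try/except over output[0..2] with an explicit length test (measured faster by a constant factor).

-- ===== PORT A =====
-- inner loop body: for skill, count in skills.items(): if count == 5: append; skills[skill] = 0
def pvAInner (st : PySem.Dict String Int × List String) (kv : String × Int) :
    PySem.Dict String Int × List String :=
  if kv.2 == 5 then (st.1.insert kv.1 0, st.2 ++ [PySem.Str.upper kv.1]) else st

-- one iteration of A's outer loop. Python iterates skills.items() live, but the only in-loop
-- mutation resets the value of the item currently at hand, so folding over the snapshot of
-- items taken after the increment is exact.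
def pvAStep (st : PySem.Dict String Int × List String) (skill : String) :
    PySem.Dict String Int × List String :=
  let skills := if st.1.contains skill then st.1.modify skill 0 (· + 1) else st.1
  skills.items.foldl pvAInner (skills, st.2)

-- the try/except: output[0..2] raise IndexError (pyGet? = none) → the except branch
def pvATail (first_skills : String) (output : List String) : String :=
  match PySem.List.pyGet? output 0, PySem.List.pyGet? output 1, PySem.List.pyGet? output 2 with
  | some a, some b, some c => first_skills ++ ", " ++ a ++ ">" ++ b ++ ">" ++ c
  | _, _, _ => "Not enough data for this skill order"

def format_skill_order (skill_order : List String) : String :=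
  let skills : PySem.Dict String Int := PySem.Dict.mk [("q", 0), ("w", 0), ("e", 0)]
  let res := skill_order.foldl pvAStep (skills, [])
  let first_skills := PySem.Str.upper (PySem.Str.join "." (PySem.List.slice skill_order none (some 4)))
  pvATail first_skills res.2

-- ===== PORT B =====
-- one iteration of B's loop: cumulative increment, check only this skill
def pvBStep (st : PySem.Dict String Int × List String) (skill : String) :
    PySem.Dict String Int × List String :=
  if st.1.contains skill then
    let counts := st.1.modify skill 0 (· + 1)
    if PySem.Int.mod (counts.getD skill 0) 5 == 0 then
      (counts, st.2 ++ [PySem.Str.upper skill])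
    else (counts, st.2)
  else st

def pvBTail (first_skills : String) (output : List String) : String :=
  if 3 ≤ output.length then
    first_skills ++ ", " ++ PySem.List.pyGetD output 0 "" ++ ">" ++
      PySem.List.pyGetD output 1 "" ++ ">" ++ PySem.List.pyGetD output 2 ""
  else "Not enough data for this skill order"

def format_skill_order_alt (skill_order : List String) : String :=
  let counts : PySem.Dict String Int := PySem.Dict.mk [("q", 0), ("w", 0), ("e", 0)]
  let res := skill_order.foldl pvBStep (counts, [])
  let first_skills := PySem.Str.upper (PySem.Str.join "." (PySem.List.slice skill_order none (some 4)))
  pvBTail first_skills res.2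

-- ===== PRECONDITION & SPEC =====
def Spec_format_skill_order (skill_order : List String) (out : String) : Prop := out = format_skill_order_alt skill_order
instance (skill_order : List String) (out : String) : Decidable (Spec_format_skill_order skill_order out) := by unfold Spec_format_skill_order; infer_instance

-- ===== CLAIM (what is proved, stated in full; the proofs are below) =====
def Claim_equal_format_skill_order : Prop := ∀ (skill_order : List String), Dom_format_skill_order skill_order → Spec_format_skill_order skill_order (format_skill_order skill_order)

-- ===== LEMMAS AND PROOFS =====
-- Invariant relating the two loop states: A's stored counter for each skill is B's cumulative
-- counter mod 5 (A's inner scan can only fire on the skill just incremented, since the other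
-- stored counters are always < 5).

theorem pv_stepA_q (qa wa ea : Int) (out : List String) (hq : 0 ≤ qa) (hw : 0 ≤ wa) (he : 0 ≤ ea) :
    pvAStep (PySem.Dict.mk [("q", PySem.Int.mod qa 5), ("w", PySem.Int.mod wa 5), ("e", PySem.Int.mod ea 5)], out) "q"
    = (PySem.Dict.mk [("q", PySem.Int.mod (qa+1) 5), ("w", PySem.Int.mod wa 5), ("e", PySem.Int.mod ea 5)],
       if (qa+1) % 5 = 0 then out ++ [PySem.Str.upper "q"] else out) := by
  have hmw : PySem.Int.mod wa 5 = wa % 5 := PySem.Int.mod_eq_emod_of_pos (by norm_num)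
  have hme : PySem.Int.mod ea 5 = ea % 5 := PySem.Int.mod_eq_emod_of_pos (by norm_num)
  have hmq : PySem.Int.mod qa 5 = qa % 5 := PySem.Int.mod_eq_emod_of_pos (by norm_num)
  have hmq1 : PySem.Int.mod (qa+1) 5 = (qa+1) % 5 := PySem.Int.mod_eq_emod_of_pos (by norm_num)
  have h2 : ¬ (wa % 5 = 5) := by omega
  have h3 : ¬ (ea % 5 = 5) := by omega
  by_cases h : (qa+1) % 5 = 0
  · have h1 : qa % 5 + 1 = 5 := by omega
    simp [pvAStep, pvAInner, PySem.Dict.contains, PySem.Dict.modify, PySem.Dict.get?,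
      PySem.Dict.getD, PySem.Dict.insert, hmq1, h1, h2, h3, h]
  · have h1 : ¬ (qa % 5 + 1 = 5) := by omega
    simp [pvAStep, pvAInner, PySem.Dict.contains, PySem.Dict.modify, PySem.Dict.get?,
      PySem.Dict.getD, PySem.Dict.insert, hmq, hmw, hme, hmq1, h1, h2, h3, h]
    omega

theorem pv_stepA_w (qa wa ea : Int) (out : List String) (hq : 0 ≤ qa) (hw : 0 ≤ wa) (he : 0 ≤ ea) :
    pvAStep (PySem.Dict.mk [("q", PySem.Int.mod qa 5), ("w", PySem.Int.mod wa 5), ("e", PySem.Int.mod ea 5)], out) "w"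
    = (PySem.Dict.mk [("q", PySem.Int.mod qa 5), ("w", PySem.Int.mod (wa+1) 5), ("e", PySem.Int.mod ea 5)],
       if (wa+1) % 5 = 0 then out ++ [PySem.Str.upper "w"] else out) := by
  have hmw : PySem.Int.mod wa 5 = wa % 5 := PySem.Int.mod_eq_emod_of_pos (by norm_num)
  have hme : PySem.Int.mod ea 5 = ea % 5 := PySem.Int.mod_eq_emod_of_pos (by norm_num)
  have hmq : PySem.Int.mod qa 5 = qa % 5 := PySem.Int.mod_eq_emod_of_pos (by norm_num)
  have hmw1 : PySem.Int.mod (wa+1) 5 = (wa+1) % 5 := PySem.Int.mod_eq_emod_of_pos (by norm_num)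
  have h2 : ¬ (qa % 5 = 5) := by omega
  have h3 : ¬ (ea % 5 = 5) := by omega
  by_cases h : (wa+1) % 5 = 0
  · have h1 : wa % 5 + 1 = 5 := by omega
    simp [pvAStep, pvAInner, PySem.Dict.contains, PySem.Dict.modify, PySem.Dict.get?,
      PySem.Dict.getD, PySem.Dict.insert, hmw1, h1, h2, h3, h]
  · have h1 : ¬ (wa % 5 + 1 = 5) := by omega
    simp [pvAStep, pvAInner, PySem.Dict.contains, PySem.Dict.modify, PySem.Dict.get?,
      PySem.Dict.getD, PySem.Dict.insert, hmq, hmw, hme, hmw1, h1, h2, h3, h]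
    omega

theorem pv_stepA_e (qa wa ea : Int) (out : List String) (hq : 0 ≤ qa) (hw : 0 ≤ wa) (he : 0 ≤ ea) :
    pvAStep (PySem.Dict.mk [("q", PySem.Int.mod qa 5), ("w", PySem.Int.mod wa 5), ("e", PySem.Int.mod ea 5)], out) "e"
    = (PySem.Dict.mk [("q", PySem.Int.mod qa 5), ("w", PySem.Int.mod wa 5), ("e", PySem.Int.mod (ea+1) 5)],
       if (ea+1) % 5 = 0 then out ++ [PySem.Str.upper "e"] else out) := by
  have hmw : PySem.Int.mod wa 5 = wa % 5 := PySem.Int.mod_eq_emod_of_pos (by norm_num)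
  have hme : PySem.Int.mod ea 5 = ea % 5 := PySem.Int.mod_eq_emod_of_pos (by norm_num)
  have hmq : PySem.Int.mod qa 5 = qa % 5 := PySem.Int.mod_eq_emod_of_pos (by norm_num)
  have hme1 : PySem.Int.mod (ea+1) 5 = (ea+1) % 5 := PySem.Int.mod_eq_emod_of_pos (by norm_num)
  have h2 : ¬ (qa % 5 = 5) := by omega
  have h3 : ¬ (wa % 5 = 5) := by omega
  by_cases h : (ea+1) % 5 = 0
  · have h1 : ea % 5 + 1 = 5 := by omega
    simp [pvAStep, pvAInner, PySem.Dict.contains, PySem.Dict.modify, PySem.Dict.get?,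
      PySem.Dict.getD, PySem.Dict.insert, hme1, h1, h2, h3, h]
  · have h1 : ¬ (ea % 5 + 1 = 5) := by omega
    simp [pvAStep, pvAInner, PySem.Dict.contains, PySem.Dict.modify, PySem.Dict.get?,
      PySem.Dict.getD, PySem.Dict.insert, hmq, hmw, hme, hme1, h1, h2, h3, h]
    omega

theorem pv_stepA_other (qa wa ea : Int) (out : List String) (s : String)
    (hsq : s ≠ "q") (hsw : s ≠ "w") (hse : s ≠ "e") (hq : 0 ≤ qa) (hw : 0 ≤ wa) (he : 0 ≤ ea) :
    pvAStep (PySem.Dict.mk [("q", PySem.Int.mod qa 5), ("w", PySem.Int.mod wa 5), ("e", PySem.Int.mod ea 5)], out) s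
    = (PySem.Dict.mk [("q", PySem.Int.mod qa 5), ("w", PySem.Int.mod wa 5), ("e", PySem.Int.mod ea 5)], out) := by
  have hmq : PySem.Int.mod qa 5 = qa % 5 := PySem.Int.mod_eq_emod_of_pos (by norm_num)
  have hmw : PySem.Int.mod wa 5 = wa % 5 := PySem.Int.mod_eq_emod_of_pos (by norm_num)
  have hme : PySem.Int.mod ea 5 = ea % 5 := PySem.Int.mod_eq_emod_of_pos (by norm_num)
  have h1 : ¬ (qa % 5 = 5) := by omega
  have h2 : ¬ (wa % 5 = 5) := by omega
  have h3 : ¬ (ea % 5 = 5) := by omega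
  simp [pvAStep, pvAInner, PySem.Dict.contains, hmq, hmw, hme, h1, h2, h3,
    Ne.symm hsq, Ne.symm hsw, Ne.symm hse, hsq, hsw, hse]

theorem pv_stepB_q (qa wa ea : Int) (out : List String) :
    pvBStep (PySem.Dict.mk [("q", qa), ("w", wa), ("e", ea)], out) "q"
    = (PySem.Dict.mk [("q", qa+1), ("w", wa), ("e", ea)],
       if (qa+1) % 5 = 0 then out ++ [PySem.Str.upper "q"] else out) := by
  have hmq1 : PySem.Int.mod (qa+1) 5 = (qa+1) % 5 := PySem.Int.mod_eq_emod_of_pos (by norm_num)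
  by_cases h : (qa+1) % 5 = 0 <;>
    simp [pvBStep, PySem.Dict.contains, PySem.Dict.modify, PySem.Dict.get?,
      PySem.Dict.getD, PySem.Dict.insert, hmq1, h]

theorem pv_stepB_w (qa wa ea : Int) (out : List String) :
    pvBStep (PySem.Dict.mk [("q", qa), ("w", wa), ("e", ea)], out) "w"
    = (PySem.Dict.mk [("q", qa), ("w", wa+1), ("e", ea)],
       if (wa+1) % 5 = 0 then out ++ [PySem.Str.upper "w"] else out) := by
  have hmw1 : PySem.Int.mod (wa+1) 5 = (wa+1) % 5 := PySem.Int.mod_eq_emod_of_pos (by norm_num)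
  by_cases h : (wa+1) % 5 = 0 <;>
    simp [pvBStep, PySem.Dict.contains, PySem.Dict.modify, PySem.Dict.get?,
      PySem.Dict.getD, PySem.Dict.insert, hmw1, h]

theorem pv_stepB_e (qa wa ea : Int) (out : List String) :
    pvBStep (PySem.Dict.mk [("q", qa), ("w", wa), ("e", ea)], out) "e"
    = (PySem.Dict.mk [("q", qa), ("w", wa), ("e", ea+1)],
       if (ea+1) % 5 = 0 then out ++ [PySem.Str.upper "e"] else out) := by
  have hme1 : PySem.Int.mod (ea+1) 5 = (ea+1) % 5 := PySem.Int.mod_eq_emod_of_pos (by norm_num)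
  by_cases h : (ea+1) % 5 = 0 <;>
    simp [pvBStep, PySem.Dict.contains, PySem.Dict.modify, PySem.Dict.get?,
      PySem.Dict.getD, PySem.Dict.insert, hme1, h]

theorem pv_stepB_other (qa wa ea : Int) (out : List String) (s : String)
    (hsq : s ≠ "q") (hsw : s ≠ "w") (hse : s ≠ "e") :
    pvBStep (PySem.Dict.mk [("q", qa), ("w", wa), ("e", ea)], out) s
    = (PySem.Dict.mk [("q", qa), ("w", wa), ("e", ea)], out) := by
  simp [pvBStep, PySem.Dict.contains, hsq, hsw, hse, Ne.symm hsq, Ne.symm hsw, Ne.symm hse]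

theorem pv_loop_agree (l : List String) : ∀ (qa wa ea : Int) (out : List String),
    0 ≤ qa → 0 ≤ wa → 0 ≤ ea →
    (l.foldl pvAStep
        (PySem.Dict.mk [("q", PySem.Int.mod qa 5), ("w", PySem.Int.mod wa 5), ("e", PySem.Int.mod ea 5)], out)).2
      = (l.foldl pvBStep (PySem.Dict.mk [("q", qa), ("w", wa), ("e", ea)], out)).2 := by
  induction l with
  | nil => intro qa wa ea out _ _ _; rfl
  | cons s t ih =>
    intro qa wa ea out hq hw he
    simp only [List.foldl]
    by_cases hsq : s = "q"
    · subst hsq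
      rw [pv_stepA_q qa wa ea out hq hw he, pv_stepB_q qa wa ea out]
      exact ih (qa+1) wa ea _ (by omega) hw he
    · by_cases hsw : s = "w"
      · subst hsw
        rw [pv_stepA_w qa wa ea out hq hw he, pv_stepB_w qa wa ea out]
        exact ih qa (wa+1) ea _ hq (by omega) he
      · by_cases hse : s = "e"
        · subst hse
          rw [pv_stepA_e qa wa ea out hq hw he, pv_stepB_e qa wa ea out]
          exact ih qa wa (ea+1) _ hq hw (by omega)
        · rw [pv_stepA_other qa wa ea out s hsq hsw hse hq hw he,
              pv_stepB_other qa wa ea out s hsq hsw hse]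
          exact ih qa wa ea out hq hw he

-- tail equality: the try/except on output[0..2] equals the explicit length-3 test
theorem pv_tail_eq (fs : String) (out : List String) : pvATail fs out = pvBTail fs out := by
  rcases out with _ | ⟨a, _ | ⟨b, _ | ⟨c, t⟩⟩⟩
  · simp [pvATail, pvBTail, PySem.List.pyGet?, PySem.List.pyIdx?]
  · simp [pvATail, pvBTail, PySem.List.pyGet?, PySem.List.pyIdx?]
  · simp [pvATail, pvBTail, PySem.List.pyGet?, PySem.List.pyIdx?]
  · simp [pvATail, pvBTail, PySem.List.pyGet?, PySem.List.pyIdx?, PySem.List.pyGetD,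
      show (0:Int) ≤ (t.length:Int) + 1 + 1 by omega, show (0:Int) ≤ (t.length:Int) + 1 by omega,
      show (2:Int) ≤ (t.length:Int) + 1 + 1 by omega]

-- ===== VERDICT (by name: the statement is the Claim_ definition above) =====
theorem format_skill_order_spec : Claim_equal_format_skill_order := by
  intro skill_order _
  have h := pv_loop_agree skill_order 0 0 0 [] le_rfl le_rfl le_rfl
  simp only [show PySem.Int.mod 0 5 = 0 by decide] at h
  show pvATail (PySem.Str.upper (PySem.Str.join "." (PySem.List.slice skill_order none (some 4))))
        (skill_order.foldl pvAStep (PySem.Dict.mk [("q", 0), ("w", 0), ("e", 0)], [])).2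
      = pvBTail (PySem.Str.upper (PySem.Str.join "." (PySem.List.slice skill_order none (some 4))))
        (skill_order.foldl pvBStep (PySem.Dict.mk [("q", 0), ("w", 0), ("e", 0)], [])).2
  rw [h]
  exact pv_tail_eq _ _
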